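-- pv_equiv track=rewrite | github.com/BarisAygen/text-to-shape-aws | bedrock_client.py | _valid_shape
-- ===== SOURCE A (Python) =====
-- PRIMS = {"circle", "square", "triangle", "line"}
--
-- def _valid_shape(obj: dict) -> bool:
--     shp = str(obj.get("shape","")).lower().strip()
--     if shp not in PRIMS:
--         return False
--     if shp in {"circle","square","triangle"}:
--         return all(k in obj for k in ("x","y","size"))
--     if shp == "line":
--         return all(k in obj for k in ("x1","y1","x2","y2"))
--     return False
-- ===== SOURCE B (Python) =====
-- _BITS = {"x": 1, "y": 2, "size": 4, "x1": 8, "y1": 16, "x2": 32, "y2": 64}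
-- _NEED = {"circle": 7, "square": 7, "triangle": 7, "line": 120}
--
-- def _valid_shape(obj: dict) -> bool:
--     mask = 0
--     for k in obj:
--         mask |= _BITS.get(k, 0)
--     need = _NEED.get(str(obj.get("shape", "")).lower().strip())
--     return need is not None and mask & need == need
-- ===== Notes on version B (the rewrite author's own statement) =====
-- stated objective: alternative
-- what changed: Instead of A's branch chain that rescans obj once per required key, B makes a single pass over obj ORing a per-key bit into an integer mask, then checks the shape's required bit pattern (looked up in one table) against the mask.
import Mathlib
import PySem

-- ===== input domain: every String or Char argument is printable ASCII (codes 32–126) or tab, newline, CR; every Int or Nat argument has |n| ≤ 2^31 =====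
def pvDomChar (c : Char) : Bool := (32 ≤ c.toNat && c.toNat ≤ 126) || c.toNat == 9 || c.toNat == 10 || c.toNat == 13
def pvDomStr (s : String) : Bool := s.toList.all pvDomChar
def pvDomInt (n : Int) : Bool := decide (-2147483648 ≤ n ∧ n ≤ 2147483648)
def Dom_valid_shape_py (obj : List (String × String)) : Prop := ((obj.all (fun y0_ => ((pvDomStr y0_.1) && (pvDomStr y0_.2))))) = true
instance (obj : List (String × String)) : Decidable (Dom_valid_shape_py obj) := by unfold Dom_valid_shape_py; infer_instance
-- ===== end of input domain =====

-- B replaces A's branch chain with per-key scans by ONE pass over obj that ORs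
-- per-key bits into a mask, then checks the shape's required bit pattern; same
-- results, no speed claim (alternative decomposition).

-- ===== PORT A =====
def valid_shape_py (obj : List (String × String)) : Bool :=
  let shp := PySem.Str.strip (PySem.Str.lower ((PySem.Dict.mk obj).getD "shape" ""))
  if !(PySem.Set.contains (PySem.Set.ofList ["circle", "square", "triangle", "line"]) shp) then
    false
  else if PySem.Set.contains (PySem.Set.ofList ["circle", "square", "triangle"]) shp then
    ["x", "y", "size"].all (fun k => (PySem.Dict.mk obj).contains k)
  else if shp == "line" then
    ["x1", "y1", "x2", "y2"].all (fun k => (PySem.Dict.mk obj).contains k)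
  else false

-- ===== PORT B =====
def bitsB : PySem.Dict String Nat := PySem.Dict.mk
  [("x", 1), ("y", 2), ("size", 4), ("x1", 8), ("y1", 16), ("x2", 32), ("y2", 64)]

def needB : PySem.Dict String Nat := PySem.Dict.mk
  [("circle", 7), ("square", 7), ("triangle", 7), ("line", 120)]

def valid_shape_py_alt (obj : List (String × String)) : Bool :=
  let mask := obj.foldl (fun m p => m ||| bitsB.getD p.1 0) 0
  match needB.get? (PySem.Str.strip (PySem.Str.lower ((PySem.Dict.mk obj).getD "shape" ""))) with
  | none => false
  | some need => mask &&& need == need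

-- ===== PRECONDITION & SPEC =====
def Spec_valid_shape_py (obj : List (String × String)) (out : Bool) : Prop := out = valid_shape_py_alt obj
instance (obj : List (String × String)) (out : Bool) : Decidable (Spec_valid_shape_py obj out) := by unfold Spec_valid_shape_py; infer_instance

-- ===== CLAIM (what is proved, stated in full; the proofs are below) =====
def Claim_equal_valid_shape_py : Prop := ∀ (obj : List (String × String)), Dom_valid_shape_py obj → Spec_valid_shape_py obj (valid_shape_py obj)

-- ===== LEMMAS AND PROOFS =====

-- canonical value of B's mask: one bit per required key already seen
def mrep (bx by_ bs b1 b2 b3 b4 : Bool) : Nat :=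
  (cond bx 1 0) + (cond by_ 2 0) + (cond bs 4 0) + (cond b1 8 0) +
  (cond b2 16 0) + (cond b3 32 0) + (cond b4 64 0)

lemma mrep_or_x : ∀ bx by_ bs b1 b2 b3 b4 : Bool,
    mrep bx by_ bs b1 b2 b3 b4 ||| 1 = mrep true by_ bs b1 b2 b3 b4 := by decide
lemma mrep_or_y : ∀ bx by_ bs b1 b2 b3 b4 : Bool,
    mrep bx by_ bs b1 b2 b3 b4 ||| 2 = mrep bx true bs b1 b2 b3 b4 := by decide
lemma mrep_or_s : ∀ bx by_ bs b1 b2 b3 b4 : Bool,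
    mrep bx by_ bs b1 b2 b3 b4 ||| 4 = mrep bx by_ true b1 b2 b3 b4 := by decide
lemma mrep_or_x1 : ∀ bx by_ bs b1 b2 b3 b4 : Bool,
    mrep bx by_ bs b1 b2 b3 b4 ||| 8 = mrep bx by_ bs true b2 b3 b4 := by decide
lemma mrep_or_y1 : ∀ bx by_ bs b1 b2 b3 b4 : Bool,
    mrep bx by_ bs b1 b2 b3 b4 ||| 16 = mrep bx by_ bs b1 true b3 b4 := by decide
lemma mrep_or_x2 : ∀ bx by_ bs b1 b2 b3 b4 : Bool,
    mrep bx by_ bs b1 b2 b3 b4 ||| 32 = mrep bx by_ bs b1 b2 true b4 := by decide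
lemma mrep_or_y2 : ∀ bx by_ bs b1 b2 b3 b4 : Bool,
    mrep bx by_ bs b1 b2 b3 b4 ||| 64 = mrep bx by_ bs b1 b2 b3 true := by decide
lemma mrep_or_zero : ∀ bx by_ bs b1 b2 b3 b4 : Bool,
    mrep bx by_ bs b1 b2 b3 b4 ||| 0 = mrep bx by_ bs b1 b2 b3 b4 := by decide

lemma mrep_and_7 : ∀ bx by_ bs b1 b2 b3 b4 : Bool,
    (mrep bx by_ bs b1 b2 b3 b4 &&& 7 == 7) = (bx && by_ && bs) := by decide
lemma mrep_and_120 : ∀ bx by_ bs b1 b2 b3 b4 : Bool,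
    (mrep bx by_ bs b1 b2 b3 b4 &&& 120 == 120) = (b1 && b2 && b3 && b4) := by decide

-- the key of the mask fold: it computes mrep of the seven per-key scans
lemma mask_fold (obj : List (String × String)) :
    ∀ bx by_ bs b1 b2 b3 b4 : Bool,
    obj.foldl (fun m p => m ||| bitsB.getD p.1 0) (mrep bx by_ bs b1 b2 b3 b4) =
      mrep (bx || obj.any (fun p => p.1 == "x")) (by_ || obj.any (fun p => p.1 == "y"))
           (bs || obj.any (fun p => p.1 == "size")) (b1 || obj.any (fun p => p.1 == "x1"))
           (b2 || obj.any (fun p => p.1 == "y1")) (b3 || obj.any (fun p => p.1 == "x2"))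
           (b4 || obj.any (fun p => p.1 == "y2")) := by
  induction obj with
  | nil => intro _ _ _ _ _ _ _; simp [mrep]
  | cons p rest ih =>
    intro bx by_ bs b1 b2 b3 b4
    simp only [List.foldl_cons, List.any_cons]
    by_cases hx : p.1 = "x"
    · rw [show bitsB.getD p.1 0 = 1 by simp [hx, bitsB, PySem.Dict.getD, PySem.Dict.get?],
        mrep_or_x, ih]
      simp [hx]
    by_cases hy : p.1 = "y"
    · rw [show bitsB.getD p.1 0 = 2 by simp [hy, bitsB, PySem.Dict.getD, PySem.Dict.get?],
        mrep_or_y, ih]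
      simp [hy]
    by_cases hs : p.1 = "size"
    · rw [show bitsB.getD p.1 0 = 4 by simp [hs, bitsB, PySem.Dict.getD, PySem.Dict.get?],
        mrep_or_s, ih]
      simp [hs]
    by_cases h1 : p.1 = "x1"
    · rw [show bitsB.getD p.1 0 = 8 by simp [h1, bitsB, PySem.Dict.getD, PySem.Dict.get?],
        mrep_or_x1, ih]
      simp [h1]
    by_cases h2 : p.1 = "y1"
    · rw [show bitsB.getD p.1 0 = 16 by simp [h2, bitsB, PySem.Dict.getD, PySem.Dict.get?],
        mrep_or_y1, ih]
      simp [h2]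
    by_cases h3 : p.1 = "x2"
    · rw [show bitsB.getD p.1 0 = 32 by simp [h3, bitsB, PySem.Dict.getD, PySem.Dict.get?],
        mrep_or_x2, ih]
      simp [h3]
    by_cases h4 : p.1 = "y2"
    · rw [show bitsB.getD p.1 0 = 64 by simp [h4, bitsB, PySem.Dict.getD, PySem.Dict.get?],
        mrep_or_y2, ih]
      simp [h4]
    · rw [show bitsB.getD p.1 0 = 0 by
          simp [bitsB, PySem.Dict.getD, PySem.Dict.get?_mk_cons, PySem.Dict.get?, Ne.symm hx, Ne.symm hy, Ne.symm hs, Ne.symm h1, Ne.symm h2, Ne.symm h3, Ne.symm h4],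
        mrep_or_zero, ih]
      have e : ∀ s : String, ¬p.1 = s → (p.1 == s) = false := fun s h => by simp [h]
      simp [e _ hx, e _ hy, e _ hs, e _ h1, e _ h2, e _ h3, e _ h4]

lemma mask_eq (obj : List (String × String)) :
    obj.foldl (fun m p => m ||| bitsB.getD p.1 0) 0 =
      mrep (obj.any (fun p => p.1 == "x")) (obj.any (fun p => p.1 == "y"))
           (obj.any (fun p => p.1 == "size")) (obj.any (fun p => p.1 == "x1"))
           (obj.any (fun p => p.1 == "y1")) (obj.any (fun p => p.1 == "x2"))
           (obj.any (fun p => p.1 == "y2")) := by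
  have h := mask_fold obj false false false false false false false
  simpa [mrep] using h

-- ===== VERDICT (by name: the statement is the Claim_ definition above) =====
theorem valid_shape_py_spec : Claim_equal_valid_shape_py := by
  intro obj _
  unfold Spec_valid_shape_py valid_shape_py valid_shape_py_alt
  rw [mask_eq]
  generalize PySem.Str.strip (PySem.Str.lower ((PySem.Dict.mk obj).getD "shape" "")) = s
  by_cases h1 : s = "circle"
  · subst h1
    simp [needB, PySem.Dict.get?_mk_cons, PySem.Set.contains, PySem.Set.ofList,
      PySem.Dict.contains, mrep_and_7, Bool.and_assoc]
  by_cases h2 : s = "square"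
  · subst h2
    simp [needB, PySem.Dict.get?_mk_cons, PySem.Set.contains, PySem.Set.ofList,
      PySem.Dict.contains, mrep_and_7, Bool.and_assoc]
  by_cases h3 : s = "triangle"
  · subst h3
    simp [needB, PySem.Dict.get?_mk_cons, PySem.Set.contains, PySem.Set.ofList,
      PySem.Dict.contains, mrep_and_7, Bool.and_assoc]
  by_cases h4 : s = "line"
  · subst h4
    simp [needB, PySem.Dict.get?_mk_cons, PySem.Set.contains, PySem.Set.ofList,
      PySem.Dict.contains, mrep_and_120, Bool.and_assoc]
  · simp [needB, PySem.Dict.get?_mk_cons, PySem.Set.contains, PySem.Set.ofList, PySem.Dict.get?,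
      Ne.symm h1, Ne.symm h2, Ne.symm h3, Ne.symm h4, h1, h2, h3, h4]
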